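-- pv_equiv track=rewrite | github.com/imjinshuo/RulER | scripts/RQ3/utils.py | get_unmapped_lines
-- ===== SOURCE A (Python) =====
-- def get_unmapped_lines(M, source_lines, trans_lines, source_stmt_list, trans_stmt_list, source_stmt_list_pos, trans_stmt_list_pos):
--     unmapped_s_line_ids = []
--     unmapped_t_line_ids = []
--     for s_stmt_id, s_stmt in enumerate(source_stmt_list):
--         if_mapped = False
--         for t_stmt_id, t_stmt in enumerate(trans_stmt_list):
--             if M[f'{s_stmt_id}-{t_stmt_id}']:
--                 if_mapped = True
--         if not if_mapped:
--             pos_set = []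
--             for item in source_stmt_list_pos[s_stmt_id]:
--                 if source_lines[item[0]].strip() not in ['{', '}'] and item[0] not in pos_set:
--                     pos_set.append(item[0])
--             unmapped_s_line_ids.extend(pos_set)
--     for t_stmt_id, t_stmt in enumerate(trans_stmt_list):
--         if_mapped = False
--         for s_stmt_id, s_stmt in enumerate(source_stmt_list):
--             if M[f'{s_stmt_id}-{t_stmt_id}']:
--                 if_mapped = True
--         if not if_mapped:
--             pos_set = []
--             for item in trans_stmt_list_pos[t_stmt_id]:
--                 if trans_lines[item[0]].strip() not in ['{', '}'] and item[0] not in pos_set: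
--                     pos_set.append(item[0])
--             unmapped_t_line_ids.extend(pos_set)
--     return unmapped_s_line_ids, unmapped_t_line_ids
-- ===== SOURCE B (Python) =====
-- def get_unmapped_lines(M, source_lines, trans_lines, source_stmt_list, trans_stmt_list, source_stmt_list_pos, trans_stmt_list_pos):
--     S = len(source_stmt_list)
--     T = len(trans_stmt_list)
--     # one fused pass over the mapping grid, building both flag tables at once
--     s_mapped = [False] * S
--     t_mapped = [False] * T
--     for s in range(S):
--         for t in range(T):
--             if M['%d-%d' % (s, t)]:
--                 s_mapped[s] = True
--                 t_mapped[t] = True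
--
--     def collect(mapped, lines, pos_lists):
--         out = []
--         for i in range(len(mapped)):
--             if not mapped[i]:
--                 seen = []
--                 for item in pos_lists[i]:
--                     if lines[item[0]].strip() not in ('{', '}') and item[0] not in seen:
--                         seen.append(item[0])
--                 out.extend(seen)
--         return out
--
--     return (collect(s_mapped, source_lines, source_stmt_list_pos),
--             collect(t_mapped, trans_lines, trans_stmt_list_pos))
-- ===== Notes on version B (the rewrite author's own statement) =====
-- stated objective: alternative
-- what changed: Replaces A's two independent nested existence scans of the mapping grid (2*S*T key builds and dict lookups, with the collection interleaved) by one fused pass over the S x T grid that fills both boolean mapped-tables at once, followed by two linear collection passes over the tables.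
import Mathlib
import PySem

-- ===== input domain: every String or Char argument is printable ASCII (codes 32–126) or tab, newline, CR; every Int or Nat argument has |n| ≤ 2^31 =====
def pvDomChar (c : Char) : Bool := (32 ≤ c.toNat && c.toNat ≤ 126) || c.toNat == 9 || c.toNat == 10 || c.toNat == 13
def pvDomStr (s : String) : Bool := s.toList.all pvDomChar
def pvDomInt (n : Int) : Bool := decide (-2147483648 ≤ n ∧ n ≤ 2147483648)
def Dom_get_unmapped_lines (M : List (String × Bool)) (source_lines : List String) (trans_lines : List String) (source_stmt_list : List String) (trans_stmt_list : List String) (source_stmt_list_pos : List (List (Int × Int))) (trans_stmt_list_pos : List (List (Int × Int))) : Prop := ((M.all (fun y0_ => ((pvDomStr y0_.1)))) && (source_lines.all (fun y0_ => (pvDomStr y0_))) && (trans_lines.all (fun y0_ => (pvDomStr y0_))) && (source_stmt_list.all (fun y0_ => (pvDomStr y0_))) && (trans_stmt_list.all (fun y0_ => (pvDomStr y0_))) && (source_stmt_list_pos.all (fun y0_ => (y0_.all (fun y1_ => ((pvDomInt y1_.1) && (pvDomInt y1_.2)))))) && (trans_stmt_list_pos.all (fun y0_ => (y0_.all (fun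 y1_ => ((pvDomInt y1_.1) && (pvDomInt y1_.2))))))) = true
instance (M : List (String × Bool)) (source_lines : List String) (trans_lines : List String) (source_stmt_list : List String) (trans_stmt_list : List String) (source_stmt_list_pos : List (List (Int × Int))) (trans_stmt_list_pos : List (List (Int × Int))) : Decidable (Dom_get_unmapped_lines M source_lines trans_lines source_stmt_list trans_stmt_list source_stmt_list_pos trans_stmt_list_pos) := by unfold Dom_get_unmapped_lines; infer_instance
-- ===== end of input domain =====

-- B replaces A's two independent nested existence scans of the mapping grid by one fused grid pass
-- that fills both boolean mapped-tables at once, then two linear collection passes over the tables.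

-- the key string f'{s}-{t}' both programs look up in M
def pvKey (s t : Int) : String := PySem.Int.toStr s ++ "-" ++ PySem.Int.toStr t

-- ===== PORT A =====
def get_unmapped_lines (M : List (String × Bool)) (source_lines : List String) (trans_lines : List String) (source_stmt_list : List String) (trans_stmt_list : List String) (source_stmt_list_pos : List (List (Int × Int))) (trans_stmt_list_pos : List (List (Int × Int))) : List Int × List Int :=
  let d := PySem.Dict.ofList M
  let unmapped_s_line_ids : List Int :=
    (PySem.List.enumerate source_stmt_list).foldl (fun unmapped_s p =>
      let if_mapped := (PySem.List.enumerate trans_stmt_list).foldl (fun if_mapped q =>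
          if d.getD (pvKey p.1 q.1) false then true else if_mapped) false
      if !if_mapped then
        let pos_set := (PySem.List.pyGetD source_stmt_list_pos p.1 []).foldl (fun pos_set item =>
            if PySem.Str.strip (PySem.List.pyGetD source_lines item.1 "") ∉ (["{", "}"] : List String) ∧ item.1 ∉ pos_set
            then pos_set ++ [item.1] else pos_set) ([] : List Int)
        unmapped_s ++ pos_set
      else unmapped_s) []
  let unmapped_t_line_ids : List Int :=
    (PySem.List.enumerate trans_stmt_list).foldl (fun unmapped_t q =>
      let if_mapped := (PySem.List.enumerate source_stmt_list).foldl (fun if_mapped p =>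
          if d.getD (pvKey p.1 q.1) false then true else if_mapped) false
      if !if_mapped then
        let pos_set := (PySem.List.pyGetD trans_stmt_list_pos q.1 []).foldl (fun pos_set item =>
            if PySem.Str.strip (PySem.List.pyGetD trans_lines item.1 "") ∉ (["{", "}"] : List String) ∧ item.1 ∉ pos_set
            then pos_set ++ [item.1] else pos_set) ([] : List Int)
        unmapped_t ++ pos_set
      else unmapped_t) []
  (unmapped_s_line_ids, unmapped_t_line_ids)

-- ===== PORT B =====
-- B's helper collect(mapped, lines, pos_lists)
def pvCollect (mapped : List Bool) (lines : List String) (pos_lists : List (List (Int × Int))) : List Int :=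
  (PySem.List.pyRange 0 (PySem.List.len mapped) 1).foldl (fun out i =>
    if !(PySem.List.pyGetD mapped i false) then
      let seen := (PySem.List.pyGetD pos_lists i []).foldl (fun seen item =>
          if PySem.Str.strip (PySem.List.pyGetD lines item.1 "") ∉ (["{", "}"] : List String) ∧ item.1 ∉ seen
          then seen ++ [item.1] else seen) ([] : List Int)
      out ++ seen
    else out) []

def get_unmapped_lines_alt (M : List (String × Bool)) (source_lines : List String) (trans_lines : List String) (source_stmt_list : List String) (trans_stmt_list : List String) (source_stmt_list_pos : List (List (Int × Int))) (trans_stmt_list_pos : List (List (Int × Int))) : List Int × List Int :=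
  let d := PySem.Dict.ofList M
  let S := PySem.List.len source_stmt_list
  let T := PySem.List.len trans_stmt_list
  let tables : List Bool × List Bool :=
    (PySem.List.pyRange 0 S 1).foldl (fun st s =>
      (PySem.List.pyRange 0 T 1).foldl (fun st t =>
        if d.getD (pvKey s t) false then
          (PySem.List.pySetD st.1 s true, PySem.List.pySetD st.2 t true)
        else st) st)
      (List.replicate S.toNat false, List.replicate T.toNat false)
  (pvCollect tables.1 source_lines source_stmt_list_pos,
   pvCollect tables.2 trans_lines trans_stmt_list_pos)

-- ===== PRECONDITION & SPEC =====
-- Pre_ excludes exactly the inputs on which the Python A raises: a missing grid key f'{s}-{t}' in M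
-- (KeyError), and, for an unmapped statement, a too-short pos list (IndexError) or a pos entry whose
-- line index is out of Python's index range for the lines list (IndexError).
def Pre_get_unmapped_lines (M : List (String × Bool)) (source_lines : List String) (trans_lines : List String) (source_stmt_list : List String) (trans_stmt_list : List String) (source_stmt_list_pos : List (List (Int × Int))) (trans_stmt_list_pos : List (List (Int × Int))) : Prop :=
  (∀ s < source_stmt_list.length, ∀ t < trans_stmt_list.length,
      (PySem.Dict.ofList M).contains (pvKey s t) = true) ∧
  (∀ s < source_stmt_list.length,
      (∀ t < trans_stmt_list.length, (PySem.Dict.ofList M).getD (pvKey s t) false = false) →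
      s < source_stmt_list_pos.length ∧
      ∀ item ∈ source_stmt_list_pos.getD s [], PySem.Raise.InRange source_lines.length item.1) ∧
  (∀ t < trans_stmt_list.length,
      (∀ s < source_stmt_list.length, (PySem.Dict.ofList M).getD (pvKey s t) false = false) →
      t < trans_stmt_list_pos.length ∧
      ∀ item ∈ trans_stmt_list_pos.getD t [], PySem.Raise.InRange trans_lines.length item.1)
instance (M : List (String × Bool)) (source_lines : List String) (trans_lines : List String) (source_stmt_list : List String) (trans_stmt_list : List String) (source_stmt_list_pos : List (List (Int × Int))) (trans_stmt_list_pos : List (List (Int × Int))) : Decidable (Pre_get_unmapped_lines M source_lines trans_lines source_stmt_list trans_stmt_list source_stmt_list_pos trans_stmt_list_pos) := by unfold Pre_get_unmapped_lines; infer_instance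

def pvWitness_get_unmapped_lines : (List (String × Bool)) × List String × List String × List String × List String × (List (List (Int × Int))) × (List (List (Int × Int))) :=
  ([("0-0", false)], ["{", "a"], ["b"], ["x"], ["y"], [[(1, 0)]], [[(0, 0)]])

def Spec_get_unmapped_lines (M : List (String × Bool)) (source_lines : List String) (trans_lines : List String) (source_stmt_list : List String) (trans_stmt_list : List String) (source_stmt_list_pos : List (List (Int × Int))) (trans_stmt_list_pos : List (List (Int × Int))) (out : List Int × List Int) : Prop := out = get_unmapped_lines_alt M source_lines trans_lines source_stmt_list trans_stmt_list source_stmt_list_pos trans_stmt_list_pos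
instance (M : List (String × Bool)) (source_lines : List String) (trans_lines : List String) (source_stmt_list : List String) (trans_stmt_list : List String) (source_stmt_list_pos : List (List (Int × Int))) (trans_stmt_list_pos : List (List (Int × Int))) (out : List Int × List Int) : Decidable (Spec_get_unmapped_lines M source_lines trans_lines source_stmt_list trans_stmt_list source_stmt_list_pos trans_stmt_list_pos out) := by unfold Spec_get_unmapped_lines; infer_instance

-- ===== CLAIM (what is proved, stated in full; the proofs are below) =====
def Claim_equal_get_unmapped_lines : Prop := ∀ (M : List (String × Bool)) (source_lines : List String) (trans_lines : List String) (source_stmt_list : List String) (trans_stmt_list : List String) (source_stmt_list_pos : List (List (Int × Int))) (trans_stmt_list_pos : List (List (Int × Int))), Dom_get_unmapped_lines M source_lines trans_lines source_stmt_list trans_stmt_list source_stmt_list_pos trans_stmt_list_pos → Pre_get_unmapped_lines M source_lines trans_lines source_stmt_list trans_stmt_list source_stmt_list_pos trans_stmt_list_pos → Spec_get_unmapped_lines M source_lines trans_lines source_stmt_list trans_stmt_list source_stmt_list_pos trans_stmt_list_pos (get_unmapped_lines M source_lines trans_lines source_stmt_list trans_stmt_list source_stmt_list_pos trans_stmt_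list_pos)

-- ===== LEMMAS AND PROOFS =====

-- the truthiness of M[f'{s}-{t}']
def pvP (d : PySem.Dict String Bool) (s t : Nat) : Bool := d.getD (pvKey s t) false

-- the shared order-preserving position-dedup block
def pvPosSet (lines : List String) (pl : List (Int × Int)) : List Int :=
  pl.foldl (fun pos_set item =>
    if PySem.Str.strip (PySem.List.pyGetD lines item.1 "") ∉ (["{", "}"] : List String) ∧ item.1 ∉ pos_set
    then pos_set ++ [item.1] else pos_set) []

-- both programs' collection phase, abstracted over the "mapped" condition
def pvF (n : Nat) (cond : Nat → Bool) (lines : List String) (pos : List (List (Int × Int))) : List Int :=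
  (List.range n).foldl (fun acc s => if cond s then acc ++ pvPosSet lines (pos.getD s []) else acc) []

-- B's fused grid pass, over Nat ranges
def pvGrid (d : PySem.Dict String Bool) (S T : Nat) : List Bool × List Bool :=
  (List.range S).foldl (fun st s =>
    (List.range T).foldl (fun st t =>
      if pvP d s t then (st.1.set s true, st.2.set t true) else st) st)
    (List.replicate S false, List.replicate T false)

lemma pvF_congr (n : Nat) (c1 c2 : Nat → Bool) (lines : List String) (pos : List (List (Int × Int)))
    (h : ∀ s < n, c1 s = c2 s) : pvF n c1 lines pos = pvF n c2 lines pos := by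
  unfold pvF
  refine PySem.List.foldl_congr_mem _ _ _ _ ?_
  intro acc s hs
  rw [h s (List.mem_range.mp hs)]

lemma pv_any_fold {α : Type} (l : List α) (p : α → Bool) (b : Bool) :
    l.foldl (fun fm x => if p x then true else fm) b = (b || l.any p) := by
  induction l generalizing b with
  | nil => simp
  | cons x l ih =>
    rw [List.foldl_cons, ih]
    cases hp : p x <;> simp [hp]

lemma pv_foldl_enumerate_fst {β : Type} (xs : List String) (g : β → Int → β) (b : β) :
    (PySem.List.enumerate xs).foldl (fun acc p => g acc p.1) b
      = (List.range xs.length).foldl (fun acc (s : Nat) => g acc (s : Int)) b := by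
  rw [← List.foldl_map (f := fun p : Int × String => p.1) (g := g),
      PySem.List.map_fst_enumerate, zero_add, PySem.List.pyRange_zero,
      List.foldl_map, Int.toNat_natCast]

-- A's two outer loops, abstracted over the truthiness predicate on the two indices
lemma pvA_loop (P : Int → Int → Bool) (outer inner lines : List String) (pos : List (List (Int × Int))) :
    (PySem.List.enumerate outer).foldl (fun acc p =>
        let if_mapped := (PySem.List.enumerate inner).foldl (fun fm q =>
            if P p.1 q.1 then true else fm) false
        if !if_mapped then
          let pos_set := (PySem.List.pyGetD pos p.1 []).foldl (fun ps item =>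
              if PySem.Str.strip (PySem.List.pyGetD lines item.1 "") ∉ (["{", "}"] : List String) ∧ item.1 ∉ ps
              then ps ++ [item.1] else ps) ([] : List Int)
          acc ++ pos_set
        else acc) []
      = pvF outer.length (fun s => !((List.range inner.length).any (fun t => P s t))) lines pos := by
  rw [pv_foldl_enumerate_fst (g := fun acc i =>
        let if_mapped := (PySem.List.enumerate inner).foldl (fun fm q =>
            if P i q.1 then true else fm) false
        if !if_mapped then
          let pos_set := (PySem.List.pyGetD pos i []).foldl (fun ps item =>
              if PySem.Str.strip (PySem.List.pyGetD lines item.1 "") ∉ (["{", "}"] : List String) ∧ item.1 ∉ ps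
              then ps ++ [item.1] else ps) ([] : List Int)
          acc ++ pos_set
        else acc)]
  unfold pvF
  refine PySem.List.foldl_congr_mem _ _ _ _ ?_
  intro acc s _
  rw [pv_foldl_enumerate_fst (g := fun fm t => if P (s : Int) t then true else fm),
      pv_any_fold]
  simp only [PySem.List.pyGetD_natCast, Bool.false_or, pvPosSet]

lemma pvA_eq (M : List (String × Bool)) (source_lines : List String) (trans_lines : List String) (source_stmt_list : List String) (trans_stmt_list : List String) (source_stmt_list_pos : List (List (Int × Int))) (trans_stmt_list_pos : List (List (Int × Int))) :
    get_unmapped_lines M source_lines trans_lines source_stmt_list trans_stmt_list source_stmt_list_pos trans_stmt_list_pos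
      = (pvF source_stmt_list.length
            (fun s => !((List.range trans_stmt_list.length).any (fun t => pvP (PySem.Dict.ofList M) s t)))
            source_lines source_stmt_list_pos,
         pvF trans_stmt_list.length
            (fun t => !((List.range source_stmt_list.length).any (fun s => pvP (PySem.Dict.ofList M) s t)))
            trans_lines trans_stmt_list_pos) := by
  unfold get_unmapped_lines
  refine Prod.ext ?_ ?_
  · exact pvA_loop (fun a b => (PySem.Dict.ofList M).getD (pvKey a b) false) _ _ _ _
  · exact pvA_loop (fun a b => (PySem.Dict.ofList M).getD (pvKey b a) false) _ _ _ _

lemma pvCollect_eq (mapped : List Bool) (lines : List String) (pos : List (List (Int × Int))) :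
    pvCollect mapped lines pos = pvF mapped.length (fun i => !(mapped.getD i false)) lines pos := by
  unfold pvCollect pvF pvPosSet
  rw [PySem.List.len_eq, PySem.List.pyRange_zero_nat, List.foldl_map]
  simp only [PySem.List.pyGetD_natCast]

lemma pvB_eq (M : List (String × Bool)) (source_lines : List String) (trans_lines : List String) (source_stmt_list : List String) (trans_stmt_list : List String) (source_stmt_list_pos : List (List (Int × Int))) (trans_stmt_list_pos : List (List (Int × Int))) :
    get_unmapped_lines_alt M source_lines trans_lines source_stmt_list trans_stmt_list source_stmt_list_pos trans_stmt_list_pos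
      = (pvCollect (pvGrid (PySem.Dict.ofList M) source_stmt_list.length trans_stmt_list.length).1 source_lines source_stmt_list_pos,
         pvCollect (pvGrid (PySem.Dict.ofList M) source_stmt_list.length trans_stmt_list.length).2 trans_lines trans_stmt_list_pos) := by
  unfold get_unmapped_lines_alt pvGrid pvP
  simp only [PySem.List.len_eq, PySem.List.pyRange_zero_nat, List.foldl_map,
    PySem.List.pySetD_natCast, Int.toNat_natCast]

-- the fused row step: effect on the first table
lemma pvRowAux_fst (d : PySem.Dict String Bool) (s : Nat) (ts : List Nat) (st : List Bool × List Bool) :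
    (ts.foldl (fun st t => if pvP d s t then (st.1.set s true, st.2.set t true) else st) st).1
      = if ts.any (fun t => pvP d s t) then st.1.set s true else st.1 := by
  induction ts generalizing st with
  | nil => simp
  | cons t ts ih =>
    cases hp : pvP d s t
    · simp [hp, ih]
    · simp only [List.foldl_cons, hp, if_true, ih, List.any_cons, Bool.true_or]
      split_ifs <;> simp [List.set_set]

lemma pvRowAux_len1 (d : PySem.Dict String Bool) (s : Nat) (ts : List Nat) (st : List Bool × List Bool) :
    (ts.foldl (fun st t => if pvP d s t then (st.1.set s true, st.2.set t true) else st) st).1.length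
      = st.1.length := by
  induction ts generalizing st with
  | nil => rfl
  | cons t ts ih => cases hp : pvP d s t <;> simp [hp, ih]

lemma pvRowAux_len2 (d : PySem.Dict String Bool) (s : Nat) (ts : List Nat) (st : List Bool × List Bool) :
    (ts.foldl (fun st t => if pvP d s t then (st.1.set s true, st.2.set t true) else st) st).2.length
      = st.2.length := by
  induction ts generalizing st with
  | nil => rfl
  | cons t ts ih => cases hp : pvP d s t <;> simp [hp, ih]

-- the fused row step: effect on the second table
lemma pvRowAux_snd (d : PySem.Dict String Bool) (s : Nat) (ts : List Nat) (st : List Bool × List Bool)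
    (j : Nat) (hj : j < st.2.length) :
    (ts.foldl (fun st t => if pvP d s t then (st.1.set s true, st.2.set t true) else st) st).2.getD j false
      = (st.2.getD j false || ts.any (fun t => pvP d s t && t == j)) := by
  induction ts generalizing st with
  | nil => simp
  | cons t ts ih =>
    cases hp : pvP d s t
    · rw [List.foldl_cons, if_neg (by simp [hp]), ih st hj]
      simp [hp]
    · have hj' : j < (st.2.set t true).length := by simpa using hj
      rw [List.foldl_cons, if_pos (by simp [hp])]
      rw [ih (st.1.set s true, st.2.set t true) hj']
      by_cases ht : t = j
      · subst ht
        simp [List.getD_eq_getElem?_getD, hj, hp]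
      · have htj : (t == j) = false := by simp [ht]
        simp [List.getD_eq_getElem?_getD, List.getElem?_set_ne ht, htj]

lemma pvGridAux_len1 (d : PySem.Dict String Bool) (T : Nat) (ss : List Nat) (st : List Bool × List Bool) :
    ((ss.foldl (fun st s => (List.range T).foldl
        (fun st t => if pvP d s t then (st.1.set s true, st.2.set t true) else st) st) st).1).length
      = st.1.length := by
  induction ss generalizing st with
  | nil => rfl
  | cons s ss ih => rw [List.foldl_cons, ih, pvRowAux_len1]

lemma pvGridAux_len2 (d : PySem.Dict String Bool) (T : Nat) (ss : List Nat) (st : List Bool × List Bool) :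
    ((ss.foldl (fun st s => (List.range T).foldl
        (fun st t => if pvP d s t then (st.1.set s true, st.2.set t true) else st) st) st).2).length
      = st.2.length := by
  induction ss generalizing st with
  | nil => rfl
  | cons s ss ih => rw [List.foldl_cons, ih, pvRowAux_len2]

lemma pvGridAux_fst (d : PySem.Dict String Bool) (T : Nat) (ss : List Nat) (st : List Bool × List Bool)
    (i : Nat) (hi : i < st.1.length) :
    ((ss.foldl (fun st s => (List.range T).foldl
        (fun st t => if pvP d s t then (st.1.set s true, st.2.set t true) else st) st) st).1).getD i false
      = (st.1.getD i false || (ss.contains i && (List.range T).any (fun t => pvP d i t))) := by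
  induction ss generalizing st with
  | nil => simp
  | cons s ss ih =>
    rw [List.foldl_cons]
    set st' := (List.range T).foldl
        (fun st t => if pvP d s t then (st.1.set s true, st.2.set t true) else st) st with hst'
    have hlen : st'.1.length = st.1.length := pvRowAux_len1 d s _ st
    rw [ih st' (by omega)]
    have hfst : st'.1 = if (List.range T).any (fun t => pvP d s t) then st.1.set s true else st.1 :=
      pvRowAux_fst d s _ st
    by_cases his : i = s
    · subst his
      rw [hfst]
      split_ifs with hany
      · simp [List.getD_eq_getElem?_getD, hi, hany]
      · simp [hany]
    · have : st'.1.getD i false = st.1.getD i false := by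
        rw [hfst]; split_ifs with hany
        · simp [List.getD_eq_getElem?_getD, List.getElem?_set_ne (fun h => his h.symm)]
        · rfl
      rw [this]
      simp [his]

lemma pvGridAux_snd (d : PySem.Dict String Bool) (T : Nat) (ss : List Nat) (st : List Bool × List Bool)
    (j : Nat) (hj : j < st.2.length) :
    ((ss.foldl (fun st s => (List.range T).foldl
        (fun st t => if pvP d s t then (st.1.set s true, st.2.set t true) else st) st) st).2).getD j false
      = (st.2.getD j false || ss.any (fun s => (List.range T).any (fun t => pvP d s t && t == j))) := by
  induction ss generalizing st with
  | nil => simp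
  | cons s ss ih =>
    rw [List.foldl_cons]
    set st' := (List.range T).foldl
        (fun st t => if pvP d s t then (st.1.set s true, st.2.set t true) else st) st with hst'
    have hlen : st'.2.length = st.2.length := pvRowAux_len2 d s _ st
    rw [ih st' (by omega), pvRowAux_snd d s _ st j hj]
    simp [Bool.or_assoc]

lemma pv_getD_replicate (n i : Nat) : (List.replicate n false).getD i false = false := by
  rw [List.getD_eq_getElem?_getD, List.getElem?_replicate]
  split_ifs <;> rfl

lemma pv_any_range_eq (T j : Nat) (q : Nat → Bool) (hj : j < T) :
    (List.range T).any (fun t => q t && t == j) = q j := by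
  cases hq : q j
  · simp only [List.any_eq_false]
    intro t _
    by_cases ht : t = j
    · subst ht; simp [hq]
    · simp [ht]
  · rw [List.any_eq_true]
    exact ⟨j, List.mem_range.mpr hj, by simp [hq]⟩

lemma pvGrid_len1 (d : PySem.Dict String Bool) (S T : Nat) : (pvGrid d S T).1.length = S := by
  unfold pvGrid
  rw [pvGridAux_len1]
  simp

lemma pvGrid_len2 (d : PySem.Dict String Bool) (S T : Nat) : (pvGrid d S T).2.length = T := by
  unfold pvGrid
  rw [pvGridAux_len2]
  simp

lemma pvGrid_fst (d : PySem.Dict String Bool) (S T : Nat) (i : Nat) (hi : i < S) :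
    (pvGrid d S T).1.getD i false = (List.range T).any (fun t => pvP d i t) := by
  unfold pvGrid
  rw [pvGridAux_fst d T _ _ i (by simpa using hi)]
  simp [hi]

lemma pvGrid_snd (d : PySem.Dict String Bool) (S T : Nat) (j : Nat) (hj : j < T) :
    (pvGrid d S T).2.getD j false = (List.range S).any (fun s => pvP d s j) := by
  unfold pvGrid
  rw [pvGridAux_snd d T _ _ j (by simpa using hj), pv_getD_replicate]
  rw [show (fun s => (List.range T).any (fun t => pvP d s t && t == j)) = (fun s => pvP d s j) from
    funext fun s => pv_any_range_eq T j (fun t => pvP d s t) hj]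
  simp

-- ===== VERDICT (by name: the statement is the Claim_ definition above) =====
theorem get_unmapped_lines_spec : Claim_equal_get_unmapped_lines := by
  intro M source_lines trans_lines source_stmt_list trans_stmt_list source_stmt_list_pos trans_stmt_list_pos _hDom _hPre
  unfold Spec_get_unmapped_lines
  rw [pvA_eq, pvB_eq]
  set d := PySem.Dict.ofList M with hd
  refine Prod.ext ?_ ?_
  · simp only
    rw [pvCollect_eq, pvGrid_len1]
    exact pvF_congr _ _ _ _ _ (fun s hs => by rw [pvGrid_fst d _ _ s hs])
  · simp only
    rw [pvCollect_eq, pvGrid_len2]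
    exact pvF_congr _ _ _ _ _ (fun t ht => by rw [pvGrid_snd d _ _ t ht])
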